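-- pv_equiv track=rewrite | github.com/zfifteen/z-band-prime-prefilter | benchmarks/python/prime_inference_generator/boundary_certificate_graph_v4_abstention_profile.py | nearest_unresolved_after_each_resolved
-- ===== SOURCE A (Python) =====
-- def nearest_later_offset(source_offset: int | None, offsets: list[int]) -> int | None:
--     """Return the nearest offset greater than the source offset."""
--     if source_offset is None:
--         return None
--     later = [offset for offset in offsets if offset > source_offset]
--     return min(later) if later else None
--
-- def nearest_unresolved_after_each_resolved(
--     resolved: list[int],
--     unresolved: list[int],
-- ) -> list[dict[str, int | None]]:
--     """Return nearest unresolved targets for every resolved source."""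
--     return [
--         {
--             "resolved_offset": offset,
--             "nearest_unresolved_offset": nearest_later_offset(offset, unresolved),
--         }
--         for offset in resolved
--     ]
-- ===== SOURCE B (Python) =====
-- def _bisect_right(a, x):
--     lo = 0
--     hi = len(a)
--     while lo < hi:
--         mid = (lo + hi) // 2
--         if x < a[mid]:
--             hi = mid
--         else:
--             lo = mid + 1
--     return lo
--
--
-- def nearest_unresolved_after_each_resolved(resolved, unresolved):
--     """Return nearest unresolved targets for every resolved source."""
--     s = sorted(unresolved)
--     n = len(s)
--     result = []
--     for offset in resolved:
--         i = _bisect_right(s, offset)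
--         result.append({
--             "resolved_offset": offset,
--             "nearest_unresolved_offset": s[i] if i < n else None,
--         })
--     return result
-- ===== Notes on version B (the rewrite author's own statement) =====
-- stated objective: faster
-- what changed: B sorts the unresolved offsets once and answers each resolved source with a hand-written bisect_right binary search on the sorted list, instead of A's per-source filter-then-min scan over all unresolved offsets.
import Mathlib
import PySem

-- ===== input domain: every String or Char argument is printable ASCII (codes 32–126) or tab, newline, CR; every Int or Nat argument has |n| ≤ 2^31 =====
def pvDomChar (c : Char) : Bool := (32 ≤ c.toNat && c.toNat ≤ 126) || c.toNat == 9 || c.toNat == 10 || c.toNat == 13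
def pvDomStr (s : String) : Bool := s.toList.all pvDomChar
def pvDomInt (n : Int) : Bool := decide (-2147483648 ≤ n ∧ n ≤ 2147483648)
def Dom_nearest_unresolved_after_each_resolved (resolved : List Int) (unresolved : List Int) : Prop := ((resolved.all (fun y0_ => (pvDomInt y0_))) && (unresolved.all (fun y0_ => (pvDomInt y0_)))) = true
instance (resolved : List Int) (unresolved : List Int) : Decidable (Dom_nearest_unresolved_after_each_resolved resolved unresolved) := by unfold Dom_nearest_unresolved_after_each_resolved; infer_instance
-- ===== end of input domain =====

-- B sorts the unresolved offsets once and answers each resolved source by binary search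
-- (bisect_right), replacing A's per-source filter+min scan: O((R+U) log U) vs O(R*U).

-- ===== PORT A =====
def nearest_later_offset (source_offset : Option Int) (offsets : List Int) : Option Int :=
  match source_offset with
  | none => none
  | some x =>
    let later := offsets.filter (fun o => decide (x < o))
    if later.isEmpty then none else PySem.List.min? later (fun v => v)

def nearest_unresolved_after_each_resolved (resolved : List Int) (unresolved : List Int) : List (List (String × Option Int)) :=
  resolved.map (fun offset =>
    [("resolved_offset", some offset),
     ("nearest_unresolved_offset", nearest_later_offset (some offset) unresolved)])

-- ===== PORT B =====
-- hand-written bisect_right loop of Source B; a[mid] as getD (exact: 0 ≤ mid < len(a) at every call from _alt)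
def pvBsr (a : List Int) (x : Int) (lo hi : Nat) : Nat :=
  if h : lo < hi then
    let mid := (lo + hi) / 2
    if x < a.getD mid 0 then pvBsr a x lo mid else pvBsr a x (mid + 1) hi
  else lo
termination_by hi - lo
decreasing_by all_goals omega

def nearest_unresolved_after_each_resolved_alt (resolved : List Int) (unresolved : List Int) : List (List (String × Option Int)) :=
  let s := PySem.List.sorted unresolved (fun v => v)
  let n := s.length
  resolved.foldl (fun result offset =>
    let i := pvBsr s offset 0 n
    result ++ [[("resolved_offset", some offset),
                ("nearest_unresolved_offset", if i < n then some (s.getD i 0) else none)]]) []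

-- ===== PRECONDITION & SPEC =====
def Spec_nearest_unresolved_after_each_resolved (resolved : List Int) (unresolved : List Int) (out : List (List (String × Option Int))) : Prop := out = nearest_unresolved_after_each_resolved_alt resolved unresolved
instance (resolved : List Int) (unresolved : List Int) (out : List (List (String × Option Int))) : Decidable (Spec_nearest_unresolved_after_each_resolved resolved unresolved out) := by unfold Spec_nearest_unresolved_after_each_resolved; infer_instance

-- ===== CLAIM (what is proved, stated in full; the proofs are below) =====
def Claim_equal_nearest_unresolved_after_each_resolved : Prop := ∀ (resolved : List Int) (unresolved : List Int), Dom_nearest_unresolved_after_each_resolved resolved unresolved → Spec_nearest_unresolved_after_each_resolved resolved unresolved (nearest_unresolved_after_each_resolved resolved unresolved)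

-- ===== LEMMAS AND PROOFS =====

-- getD-monotonicity of a ≤-sorted list
lemma pvMono {a : List Int} (hp : a.Pairwise (· ≤ ·)) {j k : Nat}
    (hjk : j ≤ k) (hk : k < a.length) : a.getD j 0 ≤ a.getD k 0 := by
  rcases Nat.lt_or_eq_of_le hjk with h | h
  · rw [List.getD_eq_getElem a 0 (Nat.lt_trans h hk), List.getD_eq_getElem a 0 hk]
    exact List.pairwise_iff_getElem.mp hp j k _ _ h
  · subst h; rfl

-- the binary-search loop computes the partition point of (· ≤ x) / (x < ·)
lemma pvBsr_props (a : List Int) (x : Int) (hp : a.Pairwise (· ≤ ·)) :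
    ∀ lo hi, lo ≤ hi → hi ≤ a.length →
    (∀ j, j < lo → a.getD j 0 ≤ x) →
    (∀ j, hi ≤ j → j < a.length → x < a.getD j 0) →
    pvBsr a x lo hi ≤ a.length ∧
    (∀ j, j < pvBsr a x lo hi → a.getD j 0 ≤ x) ∧
    (∀ j, pvBsr a x lo hi ≤ j → j < a.length → x < a.getD j 0) := by
  intro lo hi
  induction lo, hi using pvBsr.induct a x with
  | case1 lo hi h mid hlt ih =>
    intro _ hhi hlo hhi2
    rw [pvBsr]
    simp only [h, dite_true]
    have hm : mid = (lo + hi) / 2 := rfl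
    simp only [← hm, hlt, if_true]
    exact ih (by omega) (by omega)
      hlo
      (fun j hj hjl => le_trans hlt (pvMono hp hj hjl))
  | case2 lo hi h mid hlt ih =>
    intro _ hhi hlo hhi2
    rw [pvBsr]
    simp only [h, dite_true]
    have hm : mid = (lo + hi) / 2 := rfl
    simp only [← hm, hlt, if_false]
    have hmidlt : mid < a.length := by omega
    refine ih (by omega) hhi ?_ hhi2
    intro j hj
    have hax : a.getD mid 0 ≤ x := not_lt.mp hlt
    exact le_trans (pvMono hp (by omega) hmidlt) hax
  | case3 lo hi h =>
    intro hle hhi hlo hhi2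
    rw [pvBsr]
    simp only [h, dite_false]
    exact ⟨by omega, hlo, fun j hj hjl => hhi2 j (by omega) hjl⟩

-- per-source agreement: A's filter+min equals B's sorted lookup at the partition point
lemma pvKey (u : List Int) (x : Int) :
    nearest_later_offset (some x) u =
      (let s := PySem.List.sorted u (fun v => v)
       let i := pvBsr s x 0 s.length
       if i < s.length then some (s.getD i 0) else none) := by
  set s := PySem.List.sorted u (fun v => v) with hs
  have hperm : s.Perm u := PySem.List.sorted_perm u (fun v => v) false
  have hpair : s.Pairwise (· ≤ ·) := PySem.List.sorted_pairwise u (fun v => v)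
  obtain ⟨hle, hP2, hP3⟩ := pvBsr_props s x hpair 0 s.length (Nat.zero_le _) le_rfl
    (by omega) (by omega)
  set r := pvBsr s x 0 s.length with hr
  set later := u.filter (fun o => decide (x < o)) with hlater
  by_cases hcase : r < s.length
  · -- B returns some s[r]; A's min over later is the same value
    have hxr : x < s.getD r 0 := hP3 r le_rfl hcase
    have hmem : s.getD r 0 ∈ s := by
      rw [List.getD_eq_getElem s 0 hcase]; exact List.getElem_mem hcase
    have hmemu : s.getD r 0 ∈ later := by
      rw [hlater, List.mem_filter]
      exact ⟨hperm.mem_iff.mp hmem, by simpa using hxr⟩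
    have hne : later ≠ [] := fun hnil => by simp [hnil] at hmemu
    obtain ⟨m0, hm0⟩ : ∃ m0, PySem.List.min? later (fun v => v) = some m0 := by
      cases hmin : PySem.List.min? later (fun v => v) with
      | none => exact absurd ((PySem.List.min?_eq_none_iff _ _).mp hmin) hne
      | some m0 => exact ⟨m0, rfl⟩
    have hm0later : m0 ∈ later := PySem.List.min?_mem hm0
    have hm0min : ∀ y ∈ later, m0 ≤ y := fun y hy => PySem.List.min?_isMin hm0 y hy
    have hm0u : m0 ∈ u := (List.mem_filter.mp hm0later).1
    have hxm0 : x < m0 := by have := (List.mem_filter.mp hm0later).2; simpa using this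
    -- m0 sits at some index j of s with r ≤ j, so s[r] ≤ m0
    obtain ⟨j, hjl, hje⟩ := List.mem_iff_getElem.mp (hperm.mem_iff.mpr hm0u)
    have hjge : r ≤ j := by
      by_contra hlt
      have := hP2 j (by omega)
      rw [List.getD_eq_getElem s 0 hjl, hje] at this
      omega
    have h1 : s.getD r 0 ≤ m0 := by
      have := pvMono hpair hjge hjl
      rwa [List.getD_eq_getElem s 0 hjl, hje] at this
    have h2 : m0 ≤ s.getD r 0 := hm0min _ hmemu
    have hm0eq : m0 = s.getD r 0 := le_antisymm h2 h1
    simp only [nearest_later_offset, ← hlater]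
    have : later.isEmpty = false := by simpa [List.isEmpty_iff] using hne
    rw [this]
    simp only [hm0, hm0eq]
    rw [← hr]
    simp [hcase]
  · -- r = length: every element of s (hence u) is ≤ x, later is empty, both return none
    have hreq : r = s.length := by omega
    have hempty : later = [] := by
      rw [hlater, List.filter_eq_nil_iff]
      intro y hy
      obtain ⟨j, hjl, hje⟩ := List.mem_iff_getElem.mp (hperm.mem_iff.mpr hy)
      have := hP2 j (by omega)
      rw [List.getD_eq_getElem s 0 hjl, hje] at this
      simp; omega
    simp only [nearest_later_offset, ← hlater, hempty]
    simp
    rw [← hr]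
    omega

-- ===== VERDICT (by name: the statement is the Claim_ definition above) =====
theorem nearest_unresolved_after_each_resolved_spec : Claim_equal_nearest_unresolved_after_each_resolved := by
  intro resolved unresolved _
  unfold Spec_nearest_unresolved_after_each_resolved
  unfold nearest_unresolved_after_each_resolved nearest_unresolved_after_each_resolved_alt
  rw [PySem.List.foldl_append_singleton_eq_map]
  apply List.map_congr_left
  intro offset _
  have := pvKey unresolved offset
  simp only [this]
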